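-- pv_equiv track=rewrite | github.com/mengyangbai/leetcode | practise/distance.py | solution
-- ===== SOURCE A (Python) =====
-- def solution(S, T):
--     # write your code in Python 3.6
--     '''
--         not the classic Edit Distance problem
--         because we can only caluate one time
--         no dp needed
--     '''
--     if S == T:
--         return "NOTHING"
--
--     S = list(S)
--     T = list(T)
--     if len(S) == len(T) + 1:
--         # delete
--         for j in range(len(T))[::-1]:
--             for i in range(len(S))[::-1]:
--                 if T[j] == S[i]:
--                     del S[i]
--                     del T[j]
--                     break
--
--         if len(T) != 0 or len(S) != 1:
--             return "IMPOSSIBLE"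
--         else:
--             return "DELETE {}".format(S[0])
--
--     elif len(S) == len(T) - 1:
--         # insert
--         for i in range(len(S))[::-1]:
--             for j in range(len(T))[::-1]:
--                 if T[j] == S[i]:
--                     del S[i]
--                     del T[j]
--                     break
--
--         if len(S) != 0 or len(T) != 1:
--             return "IMPOSSIBLE"
--         else:
--             return "INSERT {}".format(T[0])
--
--     elif len(S) == len(T):
--         result = []
--         for i in range(len(S)):
--             if S[i] != T[i]:
--                 result.append(S[i])
--
--         if len(result) == 2:
--             return "SWAP {} {}".format(result[0], result[1])
--         else:
--             return "IMPOSSIBLE"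
--
--     return "IMPOSSIBLE"
-- ===== SOURCE B (Python) =====
-- def _extra(big, small):
--     # big and small are sorted lists, len(big) == len(small) + 1.
--     # Two-pointer merge: returns the single extra char of big iff small is a
--     # sub-multiset of big, else None.
--     extra = None
--     i = j = 0
--     while i < len(big) and j < len(small):
--         if big[i] == small[j]:
--             i += 1
--             j += 1
--         elif extra is None:
--             extra = big[i]
--             i += 1
--         else:
--             return None
--     if j < len(small):
--         return None
--     if extra is None:
--         extra = big[i]
--     return extra
--
--
-- def solution(S, T):
--     if S == T:
--         return "NOTHING"
--     if len(S) == len(T) + 1: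
--         c = _extra(sorted(S), sorted(T))
--         return "IMPOSSIBLE" if c is None else "DELETE {}".format(c)
--     if len(S) == len(T) - 1:
--         c = _extra(sorted(T), sorted(S))
--         return "IMPOSSIBLE" if c is None else "INSERT {}".format(c)
--     if len(S) == len(T):
--         mism = [(a, b) for a, b in zip(S, T) if a != b]
--         if len(mism) == 2:
--             return "SWAP {} {}".format(mism[0][0], mism[1][0])
--         return "IMPOSSIBLE"
--     return "IMPOSSIBLE"
-- ===== Notes on version B (the rewrite author's own statement) =====
-- stated objective: alternative
-- what changed: The delete/insert branches' nested right-to-left greedy matching with in-place deletions is replaced by sorting both strings and a single two-pointer merge that finds the one extra character (multiset difference), keeping the NOTHING short-circuit and the unvalidated 2-mismatch SWAP branch via a zip comprehension.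
import Mathlib
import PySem

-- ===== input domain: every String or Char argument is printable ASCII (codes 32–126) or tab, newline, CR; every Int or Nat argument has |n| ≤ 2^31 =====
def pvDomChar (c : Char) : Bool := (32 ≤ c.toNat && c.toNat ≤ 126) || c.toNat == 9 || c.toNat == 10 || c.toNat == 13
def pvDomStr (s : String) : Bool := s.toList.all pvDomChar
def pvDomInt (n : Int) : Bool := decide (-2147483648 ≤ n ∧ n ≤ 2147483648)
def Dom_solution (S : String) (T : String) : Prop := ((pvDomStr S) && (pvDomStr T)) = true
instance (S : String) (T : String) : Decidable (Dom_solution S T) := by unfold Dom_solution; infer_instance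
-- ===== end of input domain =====

-- B replaces A's nested greedy matching with in-place deletions (delete/insert branches) by
-- sorting both strings and one two-pointer merge that extracts the single extra character
-- (an alternative algorithm of comparable cost on the measured inputs).

-- ===== PORT A =====
-- A's inner loop: scan the list right-to-left for the first index i (from the right) with
-- S[i] = c and delete it; none = the inner loop falls through without a match.
def delRightmost : List Char → Char → Option (List Char)
  | [], _ => none
  | x :: xs, c =>
    match delRightmost xs c with
    | some ys => some (x :: ys)
    | none => if x = c then some xs else none

-- A's outer loop: the second argument is the driving list REVERSED (A iterates j over
-- range(len(...))[::-1]); for each char remove its rightmost occurrence from the first list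
-- if present, else keep it as residual. Returns (depleted list, residual of the driving list).
def aloop : List Char → List Char → List Char × List Char
  | s, [] => (s, [])
  | s, c :: rest =>
    match delRightmost s c with
    | some s' => aloop s' rest
    | none => ((aloop s rest).1, (aloop s rest).2 ++ [c])

-- A's equal-length loop: for i in range(len(S)): if S[i] != T[i]: result.append(S[i]).
-- Indices are always in range (i < len(S) = len(T)), so getD's default is never used.
def amismatches (s t : List Char) : List Char :=
  (List.range s.length).foldl
    (fun acc i => if s.getD i ' ' != t.getD i ' ' then acc ++ [s.getD i ' '] else acc) []

def solution (S : String) (T : String) : String :=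
  if S = T then "NOTHING"
  else
    let s := S.toList
    let t := T.toList
    if s.length = t.length + 1 then
      -- delete branch
      let p := aloop s t.reverse
      if p.2.length ≠ 0 ∨ p.1.length ≠ 1 then "IMPOSSIBLE"
      else "DELETE ".push (p.1.headD ' ')
    else if s.length + 1 = t.length then
      -- insert branch
      let p := aloop t s.reverse
      if p.2.length ≠ 0 ∨ p.1.length ≠ 1 then "IMPOSSIBLE"
      else "INSERT ".push (p.1.headD ' ')
    else if s.length = t.length then
      let res := amismatches s t
      if res.length = 2 then (("SWAP ".push (res.getD 0 ' ')).push ' ').push (res.getD 1 ' ')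
      else "IMPOSSIBLE"
    else "IMPOSSIBLE"

-- ===== PORT B =====
-- Source B's _extra: two-pointer merge over two sorted lists with the extra-char accumulator.
-- In the fall-through case with small = [] and extra = None, Source B reads big[i]; at every call
-- site big is nonempty there (len(big) = len(small) + 1), so head? is exact.
def extraLoop : List Char → List Char → Option Char → Option Char
  | b :: bs, s :: ss, ex =>
    if b = s then extraLoop bs ss ex
    else
      match ex with
      | none => extraLoop bs (s :: ss) (some b)
      | some _ => none
  | big, small, _ex =>
    if small.length ≠ 0 then none
    else
      match _ex with
      | some c => some c
      | none => big.head?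

def solution_alt (S : String) (T : String) : String :=
  if S = T then "NOTHING"
  else
    let s := S.toList
    let t := T.toList
    if s.length = t.length + 1 then
      match extraLoop (PySem.List.sorted s (fun x => x) false)
                      (PySem.List.sorted t (fun x => x) false) none with
      | some c => "DELETE ".push c
      | none => "IMPOSSIBLE"
    else if s.length + 1 = t.length then
      match extraLoop (PySem.List.sorted t (fun x => x) false)
                      (PySem.List.sorted s (fun x => x) false) none with
      | some c => "INSERT ".push c
      | none => "IMPOSSIBLE"
    else if s.length = t.length then
      let mism := (s.zip t).filter (fun p => p.1 != p.2)
      if mism.length = 2 then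
        (("SWAP ".push ((mism.getD 0 (' ', ' ')).1)).push ' ').push ((mism.getD 1 (' ', ' ')).1)
      else "IMPOSSIBLE"
    else "IMPOSSIBLE"

-- ===== PRECONDITION & SPEC =====
def Spec_solution (S : String) (T : String) (out : String) : Prop := out = solution_alt S T
instance (S : String) (T : String) (out : String) : Decidable (Spec_solution S T out) := by unfold Spec_solution; infer_instance

-- ===== CLAIM (what is proved, stated in full; the proofs are below) =====
def Claim_equal_solution : Prop := ∀ (S : String) (T : String), Dom_solution S T → Spec_solution S T (solution S T)

-- ===== LEMMAS AND PROOFS =====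

theorem delRightmost_none_iff (s : List Char) (c : Char) :
    delRightmost s c = none ↔ c ∉ s := by
  induction s with
  | nil => simp [delRightmost]
  | cons x xs ih =>
    simp only [delRightmost]
    cases h : delRightmost xs c with
    | some ys =>
      have hmem : c ∈ xs := by
        by_contra hc
        rw [ih.mpr hc] at h; simp at h
      simp [hmem]
    | none =>
      have hnot : c ∉ xs := ih.mp h
      by_cases hx : x = c
      · subst hx; simp
      · simp [hx, hnot]
        exact fun h' => hx h'.symm

theorem delRightmost_some_multiset (s : List Char) (c : Char) (s' : List Char)
    (h : delRightmost s c = some s') :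
    c ∈ s ∧ (s' : Multiset Char) = (s : Multiset Char).erase c := by
  induction s generalizing s' with
  | nil => simp [delRightmost] at h
  | cons x xs ih =>
    simp only [delRightmost] at h
    cases hrec : delRightmost xs c with
    | some ys =>
      rw [hrec] at h
      obtain rfl : x :: ys = s' := by simpa using h
      obtain ⟨hc, hm⟩ := ih ys hrec
      refine ⟨List.mem_cons_of_mem _ hc, ?_⟩
      rw [← Multiset.cons_coe, ← Multiset.cons_coe, hm]
      by_cases hx : x = c
      · subst hx
        rw [Multiset.erase_cons_head, Multiset.cons_erase (by exact_mod_cast hc)]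
      · rw [Multiset.erase_cons_tail _ hx]
    | none =>
      rw [hrec] at h
      by_cases hx : x = c
      · subst hx
        rw [if_pos rfl] at h
        obtain rfl : xs = s' := by simpa using h
        exact ⟨by simp, by rw [← Multiset.cons_coe, Multiset.erase_cons_head]⟩
      · simp [hx] at h

-- one count-comparison step of the matching invariant
theorem cons_le_iff_le_erase {m n : Multiset Char} {c : Char} (hc : c ∈ n) :
    m ≤ n.erase c ↔ c ::ₘ m ≤ n := by
  rw [Multiset.le_iff_count, Multiset.le_iff_count]
  constructor
  · intro hcount a
    have := hcount a
    by_cases ha : a = c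
    · subst ha
      rw [Multiset.count_erase_self] at this
      have hpos : 1 ≤ n.count a := Multiset.one_le_count_iff_mem.mpr hc
      simp
      omega
    · rw [Multiset.count_erase_of_ne ha] at this
      simpa [Multiset.count_cons, ha] using this
  · intro hcount a
    have := hcount a
    by_cases ha : a = c
    · subst ha
      rw [Multiset.count_erase_self]
      simp at this
      omega
    · rw [Multiset.count_erase_of_ne ha]
      simpa [Multiset.count_cons, ha] using this

theorem aloop_spec (r : List Char) : ∀ s : List Char,
    ((aloop s r).2 = [] ↔ (r : Multiset Char) ≤ (s : Multiset Char)) ∧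
    ((r : Multiset Char) ≤ (s : Multiset Char) →
      ((aloop s r).1 : Multiset Char) = (s : Multiset Char) - (r : Multiset Char)) := by
  induction r with
  | nil => intro s; simp [aloop]
  | cons c rest ih =>
    intro s
    rw [← Multiset.cons_coe]
    cases hd : delRightmost s c with
    | none =>
      have hc : c ∉ s := (delRightmost_none_iff s c).mp hd
      have hnle : ¬ (c ::ₘ (rest : Multiset Char)) ≤ (s : Multiset Char) := by
        intro hle
        exact hc (by exact_mod_cast Multiset.mem_of_le hle (Multiset.mem_cons_self c _))
      constructor
      · simp only [aloop, hd]
        exact iff_of_false (by simp) hnle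
      · intro hle; exact absurd hle hnle
    | some s' =>
      obtain ⟨hc, hm⟩ := delRightmost_some_multiset s c s' hd
      obtain ⟨ih1, ih2⟩ := ih s'
      have hcm : c ∈ (s : Multiset Char) := by exact_mod_cast hc
      constructor
      · simp only [aloop, hd]
        rw [ih1, hm]
        exact cons_le_iff_le_erase hcm
      · intro hle
        simp only [aloop, hd]
        rw [ih2 (by rw [hm]; exact (cons_le_iff_le_erase hcm).mpr hle), hm,
            ← Multiset.sub_singleton, tsub_tsub, Multiset.singleton_add]

theorem extraLoop_someAcc (big : List Char) : ∀ (small : List Char) (d : Char),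
    big.length = small.length →
    extraLoop big small (some d) = if big = small then some d else none := by
  induction big with
  | nil =>
    intro small d h
    obtain rfl : small = [] := List.eq_nil_of_length_eq_zero h.symm
    simp [extraLoop]
  | cons b bs ih =>
    intro small d h
    cases small with
    | nil => simp at h
    | cons s ss =>
      simp only [extraLoop]
      by_cases hbs : b = s
      · subst hbs
        rw [ih ss d (by simpa using h)]
        by_cases he : bs = ss <;> simp [he]
      · simp [hbs]

theorem extraLoop_none_iff (small : List Char) : ∀ (big : List Char) (c : Char),
    big.length = small.length + 1 →
    big.Pairwise (· ≤ ·) → small.Pairwise (· ≤ ·) →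
    (extraLoop big small none = some c ↔
      (big : Multiset Char) = c ::ₘ (small : Multiset Char)) := by
  induction small with
  | nil =>
    intro big c h _ _
    obtain ⟨b, rfl⟩ := List.length_eq_one_iff.mp h
    simp [extraLoop, eq_comm]
  | cons s ss ihs =>
    intro big c h hb hs
    cases big with
    | nil => simp at h
    | cons b bs =>
      rw [← Multiset.cons_coe, ← Multiset.cons_coe]
      simp only [extraLoop]
      by_cases hbs : b = s
      · subst hbs
        rw [if_pos rfl,
            ihs bs c (by simpa using h) (List.pairwise_cons.mp hb).2 (List.pairwise_cons.mp hs).2]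
        constructor
        · intro hbc; rw [hbc, Multiset.cons_swap]
        · intro hbc
          rw [Multiset.cons_swap] at hbc
          exact (Multiset.cons_inj_right _).mp hbc
      · rw [if_neg hbs]
        rw [extraLoop_someAcc bs (s :: ss) b (by simpa using h)]
        have hble : ∀ y ∈ bs, b ≤ y := (List.pairwise_cons.mp hb).1
        have hsle : ∀ y ∈ ss, s ≤ y := (List.pairwise_cons.mp hs).1
        by_cases he : bs = s :: ss
        · subst he
          rw [if_pos rfl, ← Multiset.cons_coe]
          simp only [Option.some.injEq]
          constructor
          · intro hbc; rw [hbc]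
          · intro hmeq
            exact (Multiset.cons_inj_left _).mp hmeq
        · rw [if_neg he]
          refine iff_of_false (by simp) ?_
          intro hmeq
          -- b is somewhere in c ::ₘ s ::ₘ ss, and s is somewhere in b ::ₘ bs
          have hsmem : s = b ∨ s ∈ bs := by
            have : (s : Char) ∈ b ::ₘ (bs : Multiset Char) := by
              rw [hmeq]; exact Multiset.mem_cons_of_mem (Multiset.mem_cons_self _ _)
            simpa using this
          have hbmem : b = c ∨ b = s ∨ b ∈ ss := by
            have : (b : Char) ∈ c ::ₘ s ::ₘ (ss : Multiset Char) := by
              rw [← hmeq]; exact Multiset.mem_cons_self _ _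
            simpa using this
          rcases hbmem with hbc | hbs' | hbss
          · -- b = c: cancel and conclude bs = s :: ss, contradiction
            subst hbc
            have : (bs : Multiset Char) = ((s :: ss : List Char) : Multiset Char) := by
              rw [← Multiset.cons_coe]
              exact (Multiset.cons_inj_right _).mp hmeq
            have hperm : bs.Perm (s :: ss) := Multiset.coe_eq_coe.mp this
            exact he (List.Perm.eq_of_pairwise
              (fun a b _ _ h1 h2 => le_antisymm h1 h2)
              (List.pairwise_cons.mp hb).2 hs hperm)
          · exact hbs hbs'
          · -- b ∈ ss: then s ≤ b; and s ∈ b :: bs gives b ≤ s; so b = s, contradiction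
            have h1 : s ≤ b := hsle b hbss
            rcases hsmem with hsb | hsbs
            · exact hbs hsb.symm
            · exact hbs (le_antisymm (hble s hsbs) h1)

-- the delete/insert branch of A equals B's sort + two-pointer merge
theorem branch_eq (pre : String) (s t : List Char) (h : s.length = t.length + 1) :
    (if (aloop s t.reverse).2.length ≠ 0 ∨ (aloop s t.reverse).1.length ≠ 1 then "IMPOSSIBLE"
     else pre.push ((aloop s t.reverse).1.headD ' '))
    = match extraLoop (PySem.List.sorted s (fun x => x) false)
                      (PySem.List.sorted t (fun x => x) false) none with
      | some c => pre.push c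
      | none => "IMPOSSIBLE" := by
  have hss : ((PySem.List.sorted s (fun x => x) false : List Char) : Multiset Char) = ↑s :=
    Multiset.coe_eq_coe.mpr (PySem.List.sorted_perm s _ _)
  have hst : ((PySem.List.sorted t (fun x => x) false : List Char) : Multiset Char) = ↑t :=
    Multiset.coe_eq_coe.mpr (PySem.List.sorted_perm t _ _)
  have hlen : (PySem.List.sorted s (fun x => x) false).length
      = (PySem.List.sorted t (fun x => x) false).length + 1 := by
    rw [PySem.List.length_sorted, PySem.List.length_sorted]; exact h
  have hiff := fun c => extraLoop_none_iff (PySem.List.sorted t (fun x => x) false)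
      (PySem.List.sorted s (fun x => x) false) c hlen
      (PySem.List.sorted_pairwise s _) (PySem.List.sorted_pairwise t _)
  obtain ⟨h1, h2⟩ := aloop_spec t.reverse s
  rw [Multiset.coe_reverse] at h1 h2
  by_cases hex : ∃ c, (s : Multiset Char) = c ::ₘ (t : Multiset Char)
  · obtain ⟨c, hc⟩ := hex
    have hle : (t : Multiset Char) ≤ (s : Multiset Char) := by
      rw [hc]; exact Multiset.le_cons_self _ _
    have hnil : (aloop s t.reverse).2 = [] := h1.mpr hle
    have hone : ((aloop s t.reverse).1 : Multiset Char) = {c} := by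
      rw [h2 hle, hc, ← Multiset.singleton_add, add_tsub_cancel_right]
    have hlist : (aloop s t.reverse).1 = [c] := by
      have hl1 : (aloop s t.reverse).1.length = 1 := by
        have := congrArg Multiset.card hone
        simpa using this
      obtain ⟨a, ha⟩ := List.length_eq_one_iff.mp hl1
      rw [ha] at hone ⊢
      have : a = c := by simpa using hone
      rw [this]
    have hB : extraLoop (PySem.List.sorted s (fun x => x) false)
        (PySem.List.sorted t (fun x => x) false) none = some c :=
      (hiff c).mpr (by rw [hss, hst]; exact hc)
    rw [hB, hnil, hlist]
    simp
  · have hnle : ¬ (t : Multiset Char) ≤ (s : Multiset Char) := by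
      intro hle
      obtain ⟨u, hu⟩ := Multiset.le_iff_exists_add.mp hle
      have hcard : Multiset.card u = 1 := by
        have := congrArg Multiset.card hu
        simp at this
        omega
      obtain ⟨c, rfl⟩ := Multiset.card_eq_one.mp hcard
      exact hex ⟨c, by rw [hu, add_comm, Multiset.singleton_add]⟩
    have hne : (aloop s t.reverse).2 ≠ [] := fun hn => hnle (h1.mp hn)
    rw [if_pos (Or.inl (by simpa using hne))]
    cases hE : extraLoop (PySem.List.sorted s (fun x => x) false)
        (PySem.List.sorted t (fun x => x) false) none with
    | none => rfl
    | some c =>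
      exact absurd ⟨c, by have := (hiff c).mp hE; rwa [hss, hst] at this⟩ hex

theorem mism_eq : ∀ (s t : List Char), s.length = t.length →
    amismatches s t = ((s.zip t).filter (fun p => p.1 != p.2)).map Prod.fst := by
  have key : ∀ (s t : List Char), s.length = t.length →
      ((List.range s.length).filter (fun i => s.getD i ' ' != t.getD i ' ')).map
        (fun i => s.getD i ' ')
      = ((s.zip t).filter (fun p => p.1 != p.2)).map Prod.fst := by
    intro s
    induction s with
    | nil => intro t h; simp
    | cons a s' ih =>
      intro t h
      cases t with
      | nil => simp at h
      | cons b t' =>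
        have h' : s'.length = t'.length := by simpa using h
        have ihh := ih t' h'
        simp only [List.length_cons, List.range_succ_eq_map, List.filter_cons,
          List.getD_cons_zero, List.zip_cons_cons]
        by_cases hab : a = b
        · subst hab
          simp only [bne_self_eq_false, Bool.false_eq_true, if_false]
          simpa [List.filter_map, List.map_map, Function.comp_def, List.getElem?_cons_succ] using ihh
        · have hne : (a != b) = true := by simpa using hab
          simp only [hne, if_true, List.map_cons]
          refine congrArg _ ?_
          simpa [List.filter_map, List.map_map, Function.comp_def, List.getElem?_cons_succ] using ihh
  intro s t h
  rw [amismatches, PySem.List.foldl_append_if, List.nil_append]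
  exact key s t h

-- ===== VERDICT (by name: the statement is the Claim_ definition above) =====
theorem solution_spec : Claim_equal_solution := by
  unfold Claim_equal_solution
  intro S T _
  unfold Spec_solution solution solution_alt
  by_cases hST : S = T
  · simp [hST]
  rw [if_neg hST, if_neg hST]
  simp only []
  by_cases h1 : S.toList.length = T.toList.length + 1
  · rw [if_pos h1, if_pos h1]
    exact branch_eq "DELETE " S.toList T.toList h1
  rw [if_neg h1, if_neg h1]
  by_cases h2 : S.toList.length + 1 = T.toList.length
  · rw [if_pos h2, if_pos h2]
    exact branch_eq "INSERT " T.toList S.toList h2.symm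
  rw [if_neg h2, if_neg h2]
  by_cases h3 : S.toList.length = T.toList.length
  · rw [if_pos h3, if_pos h3]
    rw [mism_eq S.toList T.toList h3]
    set mism := (S.toList.zip T.toList).filter (fun p => p.1 != p.2) with hmism
    by_cases hl : mism.length = 2
    · obtain ⟨p, q, hpq⟩ := List.length_eq_two.mp hl
      rw [hpq]
      simp
    · rw [if_neg (by simpa using hl), if_neg hl]
  rw [if_neg h3, if_neg h3]
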